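-- pv_equiv track=rewrite | github.com/ros-industrial-attic/robodk_postprocessors | Siemens_840D_PKM.py | joints_2_TU
-- ===== SOURCE A (Python) =====
-- def joints_2_TU(joints):
--     if joints is None:
--         return 0 # "'B000000'"
--
--     turn = 0
--     njoints = len(joints)
--     for i in range(njoints):
--         if joints[i] < 0:
--             turn = turn + 2**(njoints-1-i)
--     return turn
-- ===== SOURCE B (Python) =====
-- def joints_2_TU(joints):
--     if joints is None:
--         return 0
--     turn = 0
--     for j in joints:
--         turn = turn * 2 + (1 if j < 0 else 0)
--     return turn
-- ===== Notes on version B (the rewrite author's own statement) =====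
-- stated objective: faster
-- what changed: Replaces the index loop that computes an explicit power 2**(njoints-1-i) on every iteration with a Horner-style accumulation turn = turn*2 + bit over the elements themselves, removing all indexing and per-step power construction.
import Mathlib
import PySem

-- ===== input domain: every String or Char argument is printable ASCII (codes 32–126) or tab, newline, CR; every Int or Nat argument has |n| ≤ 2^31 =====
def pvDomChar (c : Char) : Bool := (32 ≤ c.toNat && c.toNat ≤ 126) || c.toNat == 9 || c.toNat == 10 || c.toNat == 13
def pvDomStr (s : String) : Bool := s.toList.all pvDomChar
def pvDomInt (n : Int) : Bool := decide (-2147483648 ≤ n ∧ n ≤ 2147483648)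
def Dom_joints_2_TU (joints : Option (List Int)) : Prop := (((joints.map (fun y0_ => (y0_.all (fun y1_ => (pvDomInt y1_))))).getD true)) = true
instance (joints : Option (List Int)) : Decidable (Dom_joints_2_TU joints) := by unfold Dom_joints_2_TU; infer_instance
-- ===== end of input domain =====

-- ===== PORT A =====
-- literal port of A: index loop over range(njoints), adding 2**(njoints-1-i) for negative joints
def joints_2_TU (joints : Option (List Int)) : Int :=
  match joints with
  | none => 0
  | some js =>
    (PySem.List.pyRange 0 (js.length : Int) 1).foldl
      (fun turn i =>
        if PySem.List.pyGetD js i 0 < 0 then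
          turn + 2 ^ ((js.length : Int) - 1 - i).toNat
        else turn) 0

-- ===== PORT B =====
-- B: Horner-style accumulation over the elements, no indexing, no powers
def joints_2_TU_alt (joints : Option (List Int)) : Int :=
  match joints with
  | none => 0
  | some js => js.foldl (fun turn j => turn * 2 + (if j < 0 then 1 else 0)) 0

-- ===== PRECONDITION & SPEC =====
def Spec_joints_2_TU (joints : Option (List Int)) (out : Int) : Prop := out = joints_2_TU_alt joints
instance (joints : Option (List Int)) (out : Int) : Decidable (Spec_joints_2_TU joints out) := by unfold Spec_joints_2_TU; infer_instance

-- ===== CLAIM (what is proved, stated in full; the proofs are below) =====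
def Claim_equal_joints_2_TU : Prop := ∀ (joints : Option (List Int)), Dom_joints_2_TU joints → Spec_joints_2_TU joints (joints_2_TU joints)

-- ===== LEMMAS AND PROOFS =====

/-- MSB-first weighted sum of sign bits, recursively on the list. -/
def pvVal : List Int → Int
  | [] => 0
  | x :: xs => (if x < 0 then 1 else 0) * 2 ^ xs.length + pvVal xs

/-- B's Horner fold with an arbitrary accumulator. -/
theorem pvHorner (js : List Int) : ∀ acc : Int,
    js.foldl (fun turn j => turn * 2 + (if j < 0 then 1 else 0)) acc
      = acc * 2 ^ js.length + pvVal js := by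
  induction js with
  | nil => intro acc; simp [pvVal]
  | cons x xs ih =>
    intro acc
    simp only [List.foldl_cons, ih, pvVal, List.length_cons]
    ring

/-- A's index loop from position `a` computes `pvVal` of the remaining suffix. -/
theorem pvAloop (js : List Int) : ∀ (k : Nat) (a t : Int), 0 ≤ a → a + k = js.length →
    (PySem.List.pyRange a (js.length : Int) 1).foldl
      (fun turn i =>
        if PySem.List.pyGetD js i 0 < 0 then
          turn + 2 ^ ((js.length : Int) - 1 - i).toNat
        else turn) t
      = t + pvVal (js.drop a.toNat) := by
  intro k
  induction k with
  | zero =>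
    intro a t ha hk
    have hb : (js.length : Int) ≤ a := by omega
    rw [PySem.List.pyRange_one_eq_nil hb]
    have : js.length ≤ a.toNat := by omega
    simp [List.drop_eq_nil_of_le this, pvVal]
  | succ n ih =>
    intro a t ha hk
    have hlt : a < (js.length : Int) := by omega
    rw [PySem.List.pyRange_one_cons hlt]
    have hnat : a.toNat < js.length := by omega
    have hdrop : js.drop a.toNat = js[a.toNat] :: js.drop (a.toNat + 1) :=
      List.drop_eq_getElem_cons hnat
    have hget : PySem.List.pyGetD js a 0 = js[a.toNat] :=
      PySem.List.pyGetD_eq_getElem js 0 ha (by exact_mod_cast hlt)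
    have hlen : (js.drop (a.toNat + 1)).length = ((js.length : Int) - 1 - a).toNat := by
      simp [List.length_drop]; omega
    have htonat : (a + 1).toNat = a.toNat + 1 := by omega
    simp only [List.foldl_cons, hget]
    rw [ih (a + 1) _ (by omega) (by omega), hdrop]
    simp only [pvVal, htonat, hlen]
    by_cases h : js[a.toNat] < 0 <;> simp [h] <;> ring

-- ===== VERDICT (by name: the statement is the Claim_ definition above) =====
theorem joints_2_TU_spec : Claim_equal_joints_2_TU := by
  intro joints _
  unfold Spec_joints_2_TU joints_2_TU joints_2_TU_alt
  match joints with
  | none => rfl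
  | some js =>
    simp only []
    rw [pvAloop js js.length 0 0 le_rfl (by omega), pvHorner js 0]
    simp
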